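-- pv_equiv track=rewrite | github.com/mi-m1/idiom_decomp | syntactic_flexibility_frequency/enTenTen/src/get_cql.py | tokens_to_cql
-- ===== SOURCE A (Python) =====
-- def tokens_to_cql(tokens):
--     """
--     Build a CQL query from tokens, replacing
--     the "somebody + 's" sequence with a POS-based pattern.
--
--     Args:
--         tokens: list of tokens
--     Returns:
--         CQL string
--     """
--     cql = "q"
--     i = 0
--     while i < len(tokens):
--         tok = tokens[i]
--         # Detect the special "somebody + 's" sequence
--         if i + 1 < len(tokens):
--             next_tok = tokens[i+1]
--             if (str(tok) == "someone" and str(next_tok) == "'s") or (str(tok) == "something" and str(next_tok) == "'s"):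
--                 # Replace with POS-based pattern
--                 cql += '[tag="PP.?|N.*|DT|RP"]{1,2}'
--                 i += 2  # skip both tokens
--                 continue
--         if str(tok) == "someone" or str(tok) == "something":
--             cql += '[tag="PP.?|N.*|DT|RP"]{1,2}'
--             i += 1  # skip one token
--             continue
--         if str(tok) == "-":
--             i += 1  # skip one token
--             continue
--         if str(tok) == "adj":
--             cql += '[tag="J.*"]' # TODO: {1,2}
--             i += 1
--             continue
--         if str(tok) == "adv":
--             cql += '[tag="RB.?"]' # TODO: {1,2}
--             i += 1
--             continue
--         if str(tok) == "'s" or str(tok) == "’s":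
--             i += 1
--             continue
--         # if str(tok) == "a":
--         #     cql += f'[lemma="a" | lemma="the"]'
--         #     i += 1
--         #     continue
--
--         # Default: add lemma-based token
--         cql += f'[lemma="{str(tok)}"]'
--         i += 1
--     return cql
-- ===== SOURCE B (Python) =====
-- FRAG = {
--     "someone": '[tag="PP.?|N.*|DT|RP"]{1,2}',
--     "something": '[tag="PP.?|N.*|DT|RP"]{1,2}',
--     "adj": '[tag="J.*"]',
--     "adv": '[tag="RB.?"]',
--     "-": "",
--     "'s": "",
--     "\u2019s": "",
-- }
--
-- def tokens_to_cql(tokens):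
--     # The "someone + 's" lookahead in the original is redundant: 'someone' alone
--     # emits the same pattern and a following "'s" emits nothing.
--     return "q" + "".join(FRAG.get(str(t), f'[lemma="{str(t)}"]') for t in tokens)
-- ===== Notes on version B (the rewrite author's own statement) =====
-- stated objective: simpler
-- what changed: Replaces the while-loop with manual index, two-token lookahead and repeated string += by a stateless per-token fragment table joined in one pass; the lookahead is redundant since 'someone' alone emits the same pattern and a following 's emits nothing.
import Mathlib
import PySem

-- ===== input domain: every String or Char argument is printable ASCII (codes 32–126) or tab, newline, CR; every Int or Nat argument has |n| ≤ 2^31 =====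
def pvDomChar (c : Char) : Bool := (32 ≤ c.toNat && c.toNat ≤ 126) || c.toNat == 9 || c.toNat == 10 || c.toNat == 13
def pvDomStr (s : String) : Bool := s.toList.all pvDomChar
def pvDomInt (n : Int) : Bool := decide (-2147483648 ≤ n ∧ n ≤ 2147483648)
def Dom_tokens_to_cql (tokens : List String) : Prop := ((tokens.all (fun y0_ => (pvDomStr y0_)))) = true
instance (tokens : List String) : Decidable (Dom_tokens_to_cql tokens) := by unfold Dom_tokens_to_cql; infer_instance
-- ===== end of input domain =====

-- B: one pass joining a per-token fragment table; the original's "someone + 's" lookahead is redundant, so control flow simplifies.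
-- ===== PORT A =====
-- while loop over an index with possible skip-by-2 ported as recursion on the remaining suffix
def tokens_to_cql_go (cql : String) : List String → String
  | [] => cql
  -- lookahead branch (i + 1 < len(tokens)) succeeds only with at least two tokens left
  | tok :: next :: rest2 =>
      if (tok = "someone" ∧ next = "'s") ∨ (tok = "something" ∧ next = "'s") then
        tokens_to_cql_go (cql ++ "[tag=\"PP.?|N.*|DT|RP\"]{1,2}") rest2
      else if tok = "someone" ∨ tok = "something" then
        tokens_to_cql_go (cql ++ "[tag=\"PP.?|N.*|DT|RP\"]{1,2}") (next :: rest2)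
      else if tok = "-" then tokens_to_cql_go cql (next :: rest2)
      else if tok = "adj" then tokens_to_cql_go (cql ++ "[tag=\"J.*\"]") (next :: rest2)
      else if tok = "adv" then tokens_to_cql_go (cql ++ "[tag=\"RB.?\"]") (next :: rest2)
      else if tok = "'s" ∨ tok = "’s" then tokens_to_cql_go cql (next :: rest2)
      else tokens_to_cql_go (cql ++ "[lemma=\"" ++ tok ++ "\"]") (next :: rest2)
  | [tok] =>
      if tok = "someone" ∨ tok = "something" then
        tokens_to_cql_go (cql ++ "[tag=\"PP.?|N.*|DT|RP\"]{1,2}") []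
      else if tok = "-" then tokens_to_cql_go cql []
      else if tok = "adj" then tokens_to_cql_go (cql ++ "[tag=\"J.*\"]") []
      else if tok = "adv" then tokens_to_cql_go (cql ++ "[tag=\"RB.?\"]") []
      else if tok = "'s" ∨ tok = "’s" then tokens_to_cql_go cql []
      else tokens_to_cql_go (cql ++ "[lemma=\"" ++ tok ++ "\"]") []
  termination_by l => l.length

def tokens_to_cql (tokens : List String) : String := tokens_to_cql_go "q" tokens

-- ===== PORT B =====
-- FRAG.get(t, default) from Source B as a function
def tokens_to_cql_frag (t : String) : String :=
  if t = "someone" ∨ t = "something" then "[tag=\"PP.?|N.*|DT|RP\"]{1,2}"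
  else if t = "adj" then "[tag=\"J.*\"]"
  else if t = "adv" then "[tag=\"RB.?\"]"
  else if t = "-" ∨ t = "'s" ∨ t = "’s" then ""
  else "[lemma=\"" ++ t ++ "\"]"

def tokens_to_cql_alt (tokens : List String) : String :=
  "q" ++ String.join (tokens.map tokens_to_cql_frag)

-- ===== PRECONDITION & SPEC =====
def Spec_tokens_to_cql (tokens : List String) (out : String) : Prop := out = tokens_to_cql_alt tokens
instance (tokens : List String) (out : String) : Decidable (Spec_tokens_to_cql tokens out) := by unfold Spec_tokens_to_cql; infer_instance

-- ===== CLAIM (what is proved, stated in full; the proofs are below) =====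
def Claim_equal_tokens_to_cql : Prop := ∀ (tokens : List String), Dom_tokens_to_cql tokens → Spec_tokens_to_cql tokens (tokens_to_cql tokens)

-- ===== LEMMAS AND PROOFS =====

-- ===== VERDICT (by name: the statement is the Claim_ definition above) =====
lemma tokens_to_cql_foldl_append (l : List String) :
    ∀ (a b : String), a ++ l.foldl (fun r s => r ++ s) b = l.foldl (fun r s => r ++ s) (a ++ b) := by
  induction l with
  | nil => intro a b; rfl
  | cons x xs ih => intro a b; simp [List.foldl, ih, String.append_assoc]

lemma tokens_to_cql_go_len : ∀ (n : Nat) (ts : List String), ts.length ≤ n → ∀ (cql : String),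
    tokens_to_cql_go cql ts = cql ++ String.join (ts.map tokens_to_cql_frag) := by
  intro n
  induction n with
  | zero =>
    intro ts h cql
    have hts : ts = [] := by cases ts <;> simp_all
    subst hts; simp [tokens_to_cql_go, String.join]
  | succ n ih =>
    intro ts h cql
    match ts with
    | [] => simp [tokens_to_cql_go, String.join]
    | [tok] =>
      rw [tokens_to_cql_go]
      have h0 : ([] : List String).length ≤ n := by simp
      split_ifs with h1 h2 h3 h4 h5 <;>
        [rcases h1 with h1 | h1; skip; skip; skip; rcases h5 with h5 | h5; skip] <;>
        first
          | (subst h1; simp [ih [] h0, tokens_to_cql_frag, String.join, tokens_to_cql_foldl_append, String.append_assoc])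
          | (subst h2; simp [ih [] h0, tokens_to_cql_frag, String.join, tokens_to_cql_foldl_append, String.append_assoc])
          | (subst h3; simp [ih [] h0, tokens_to_cql_frag, String.join, tokens_to_cql_foldl_append, String.append_assoc])
          | (subst h4; simp [ih [] h0, tokens_to_cql_frag, String.join, tokens_to_cql_foldl_append, String.append_assoc])
          | (subst h5; simp [ih [] h0, tokens_to_cql_frag, String.join, tokens_to_cql_foldl_append, String.append_assoc])
          | simp [ih [] h0, tokens_to_cql_frag, h1, h2, h3, h4, h5, String.join, String.append_assoc]
    | tok :: next :: rest2 =>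
      have hl1 : rest2.length ≤ n := by simp at h; omega
      have hl2 : (next :: rest2).length ≤ n := by simp at h ⊢; omega
      rw [tokens_to_cql_go]
      split_ifs with h1 h2 h3 h4 h5 h6
      · have hfold : ∀ (P : String),
            P ++ List.foldl (fun r s => r ++ s) "" (List.map tokens_to_cql_frag rest2)
              = List.foldl (fun r s => r ++ s) P (List.map tokens_to_cql_frag rest2) := by
          intro P
          simpa using tokens_to_cql_foldl_append (List.map tokens_to_cql_frag rest2) P ""
        rcases h1 with ⟨ha, hb⟩ | ⟨ha, hb⟩ <;> subst ha <;> subst hb <;>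
          simp [ih rest2 hl1, tokens_to_cql_frag, String.join, String.append_assoc, hfold] <;>
          exact (tokens_to_cql_foldl_append (List.map tokens_to_cql_frag rest2) cql _).symm
      · rcases h2 with h2 | h2 <;>
          (subst h2; simp [ih _ hl2, tokens_to_cql_frag, String.join, tokens_to_cql_foldl_append,
             String.append_assoc])
      · subst h3
        simp [ih _ hl2, tokens_to_cql_frag, String.join, tokens_to_cql_foldl_append,
          String.append_assoc]
      · subst h4
        simp [ih _ hl2, tokens_to_cql_frag, String.join, tokens_to_cql_foldl_append,
          String.append_assoc]
      · subst h5
        simp [ih _ hl2, tokens_to_cql_frag, String.join, tokens_to_cql_foldl_append,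
          String.append_assoc]
      · rcases h6 with h6 | h6 <;>
          (subst h6; simp [ih _ hl2, tokens_to_cql_frag, String.join, tokens_to_cql_foldl_append,
             String.append_assoc])
      · simp [ih _ hl2, tokens_to_cql_frag, h2, h3, h4, h5, h6, String.join,
          tokens_to_cql_foldl_append, String.append_assoc]

lemma tokens_to_cql_go_eq (tokens : List String) (cql : String) :
    tokens_to_cql_go cql tokens = cql ++ String.join (tokens.map tokens_to_cql_frag) :=
  tokens_to_cql_go_len tokens.length tokens (le_refl _) cql

theorem tokens_to_cql_spec : Claim_equal_tokens_to_cql := by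
  intro tokens _
  show tokens_to_cql tokens = tokens_to_cql_alt tokens
  simp [tokens_to_cql, tokens_to_cql_alt, tokens_to_cql_go_eq]
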